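-- pv_equiv track=rewrite | github.com/georgiepayne/Find-algebraic-structures | find_cfdr.py | generate_tables
-- ===== SOURCE A (Python) =====
-- import itertools
--
-- def generate_tables(n, opp):
--     # index's s1, s2, ...
--     symbols = [f's{i}' for i in range(n)]
--     # create empty table
--     table = [[None for j in range(n)] for i in range(n)]
--
--     # a + 0 = a for addition, a * 1 = a for multipliation
--     identity = 0 if opp == "add" else 1
--     # fill in identities
--     for i in range(n):
--         table[identity][i] = symbols[i]
--         table[i][identity] = symbols[i]
--
--     # get indices that need to be filled in
--     # j from i to n leaves out half of the columns, which can be populated according the the commutative axiom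
--     none_indices = [(i, j) for i in range(n) for j in range(i, n) if table[i][j] is None]
--
--     # fill in other entries and add to table list
--     def generate_combos():
--         # Generate all possible completions of the None cells
--         for combo in itertools.product(symbols, repeat=len(none_indices)):
--             filled_table = [row[:] for row in table]  # copy table into new one
--             for index, value in zip(none_indices, combo): # fill in empty entries
--                 i, j = index
--                 # fill in entry and commutative entry
--                 filled_table[i][j] = value
--                 filled_table[j][i] = value
--
--             yield filled_table
--
--     return generate_combos()
-- ===== SOURCE B (Python) =====
-- def _place(t, i, j, s):
--     # fresh copy of t with cell (i, j) and its commutative mirror set to s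
--     new = [row[:] for row in t]
--     new[i][j] = s
--     new[j][i] = s
--     return new
--
-- def generate_tables(n, opp):
--     # Different decomposition: the base table and the free-cell list are direct
--     # formulas, and the completions are built by one breadth-wise fold extending a
--     # list of partially filled tables cell by cell (last cell varies fastest, the
--     # same order as itertools.product), instead of itertools.product + per-combo fill.
--     symbols = [f's{i}' for i in range(n)]
--     identity = 0 if opp == "add" else 1
--     base = [[symbols[j] if i == identity else symbols[i] if j == identity else None
--              for j in range(n)] for i in range(n)]
--     cells = [(i, j) for i in range(n) for j in range(i, n)
--              if i != identity and j != identity]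
--     tables = [base]
--     for i, j in cells:
--         tables = [_place(t, i, j, s) for t in tables for s in symbols]
--     return tables
-- ===== Notes on version B (the rewrite author's own statement) =====
-- stated objective: alternative
-- what changed: The base table and free-cell list become direct formulas instead of an imperative fill-then-scan, and the enumeration replaces itertools.product + per-combo zip-fill of a fresh copy with one breadth-wise fold that extends a list of partially filled tables cell by cell (returning a list rather than a generator).
import Mathlib
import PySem

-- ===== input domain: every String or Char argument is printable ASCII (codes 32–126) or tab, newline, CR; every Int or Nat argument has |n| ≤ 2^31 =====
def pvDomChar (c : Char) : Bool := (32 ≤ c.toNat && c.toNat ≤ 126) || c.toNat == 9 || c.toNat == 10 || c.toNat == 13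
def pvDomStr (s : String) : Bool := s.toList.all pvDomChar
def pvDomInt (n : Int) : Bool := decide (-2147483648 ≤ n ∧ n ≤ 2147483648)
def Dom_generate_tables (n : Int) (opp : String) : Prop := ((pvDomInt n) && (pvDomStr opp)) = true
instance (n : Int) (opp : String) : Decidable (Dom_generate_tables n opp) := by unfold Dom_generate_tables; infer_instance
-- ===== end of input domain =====

-- B replaces itertools.product + per-combo fill by formula-built base table / cell list
-- and one breadth-wise fold extending partial tables cell by cell (objective: alternative).

-- shared helpers: f"s{i}" = 's' + str(i) (exact)
def pvSym (i : Int) : String := String.ofList ('s' :: PySem.Int.toChars i)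

-- l[i] = v for 0 ≤ i < len(l); exact there (both programs only assign in-range
-- nonnegative indices on inputs admitted by Pre_), no-op otherwise
def pvSetIdx {α : Type} (l : List α) (i : Int) (v : α) : List α :=
  if 0 ≤ i ∧ i.toNat < l.length then l.set i.toNat v else l

-- t[i][j] = Some v  (read row i, replace entry j, write row back)
def pvSetCell (t : List (List (Option String))) (i j : Int) (v : String) :
    List (List (Option String)) :=
  pvSetIdx t i (pvSetIdx (PySem.List.pyGetD t i []) j (some v))

-- t[i][j] = t[j][i] = v : the two mirrored assignments both programs perform on a cell
def pvFill (t : List (List (Option String))) (c : Int × Int) (v : String) :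
    List (List (Option String)) :=
  pvSetCell (pvSetCell t c.1 c.2 v) c.2 c.1 v

-- drop the Option wrapper; exact on fully filled tables (no None remains inside Pre_)
def pvStrip (t : List (List (Option String))) : List (List String) :=
  t.map (fun row => row.map (fun c => c.getD ""))

-- ===== PORT A =====
-- itertools.product(symbols, repeat=k), tuples in product's lexicographic order
def pvProdRepeat (s : List String) : Nat → List (List String)
  | 0 => [[]]
  | k+1 => s.flatMap (fun x => (pvProdRepeat s k).map (x :: ·))

def generate_tables (n : Int) (opp : String) : List (List (List String)) :=
  let syms := (PySem.List.pyRange 0 n 1).map pvSym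
  let table0 := (PySem.List.pyRange 0 n 1).map
    (fun _ => (PySem.List.pyRange 0 n 1).map (fun _ => (none : Option String)))
  let identity : Int := if opp == "add" then 0 else 1
  let table := (PySem.List.pyRange 0 n 1).foldl
    (fun t i => pvFill t (identity, i) (PySem.List.pyGetD syms i "")) table0
  let noneIdx := (PySem.List.pyRange 0 n 1).flatMap (fun i =>
    (PySem.List.pyRange i n 1).filterMap (fun j =>
      if PySem.List.pyGetD (PySem.List.pyGetD table i []) j (some "") = none
      then some (i, j) else none))
  (pvProdRepeat syms noneIdx.length).map (fun combo =>
    pvStrip ((noneIdx.zip combo).foldl (fun t e => pvFill t e.1 e.2) table))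

-- ===== PORT B =====
def generate_tables_alt (n : Int) (opp : String) : List (List (List String)) :=
  let syms := (PySem.List.pyRange 0 n 1).map pvSym
  let identity : Int := if opp == "add" then 0 else 1
  let base := (PySem.List.pyRange 0 n 1).map (fun i => (PySem.List.pyRange 0 n 1).map
    (fun j =>
      if i = identity then some (PySem.List.pyGetD syms j "")
      else if j = identity then some (PySem.List.pyGetD syms i "")
      else (none : Option String)))
  let cells := (PySem.List.pyRange 0 n 1).flatMap (fun i =>
    (PySem.List.pyRange i n 1).filterMap (fun j =>
      if i ≠ identity ∧ j ≠ identity then some (i, j) else none))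
  (cells.foldl (fun acc c => acc.flatMap (fun t => syms.map (pvFill t c))) [base]).map pvStrip

-- ===== PRECONDITION & SPEC =====
-- Pre_ excludes exactly n = 1 with opp ≠ "add": there A raises IndexError (its identity
-- index 1 is out of range of the 1×1 table), so A returns no value.
def Pre_generate_tables (n : Int) (opp : String) : Prop := ¬(n = 1 ∧ opp ≠ "add")
instance (n : Int) (opp : String) : Decidable (Pre_generate_tables n opp) := by
  unfold Pre_generate_tables; infer_instance

def pvWitness_generate_tables : Int × String := (3, "mul")

def Spec_generate_tables (n : Int) (opp : String) (out : List (List (List String))) : Prop :=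
  out = generate_tables_alt n opp
instance (n : Int) (opp : String) (out : List (List (List String))) :
    Decidable (Spec_generate_tables n opp out) := by unfold Spec_generate_tables; infer_instance

-- ===== CLAIM (what is proved, stated in full; the proofs are below) =====
def Claim_equal_generate_tables : Prop := ∀ (n : Int) (opp : String),
  Dom_generate_tables n opp → Pre_generate_tables n opp →
  Spec_generate_tables n opp (generate_tables n opp)

-- ===== LEMMAS AND PROOFS =====

def pvTab (m : Nat) (F : Nat → Nat → Option String) : List (List (Option String)) :=
  (List.range m).map (fun a => (List.range m).map (fun b => F a b))

theorem pvTab_congr {m : Nat} {F G : Nat → Nat → Option String}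
    (h : ∀ a b, a < m → b < m → F a b = G a b) : pvTab m F = pvTab m G := by
  unfold pvTab
  refine List.map_congr_left (fun a ha => List.map_congr_left (fun b hb => ?_))
  exact h a b (List.mem_range.mp ha) (List.mem_range.mp hb)

theorem pvSetCell_tab {m : Nat} {F : Nat → Nat → Option String} {i j : Int} {v : String}
    (hi0 : 0 ≤ i) (hi : i.toNat < m) (hj0 : 0 ≤ j) (hj : j.toNat < m) :
    pvSetCell (pvTab m F) i j v =
      pvTab m (fun a b => if a = i.toNat ∧ b = j.toNat then some v else F a b) := by
  unfold pvSetCell pvTab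
  rw [PySem.List.pyGetD_of_nonneg _ _ hi0]
  rw [List.getD_eq_getElem _ _ (by simpa using hi)]
  simp only [List.getElem_map, List.getElem_range]
  unfold pvSetIdx
  simp only [List.length_map, List.length_range, hi0, hj0, hi, hj, and_self, if_pos]
  apply List.ext_getElem
  · simp
  · intro a h1 h2
    simp only [List.getElem_set, List.getElem_map, List.getElem_range]
    by_cases ha : i.toNat = a
    · subst ha
      apply List.ext_getElem
      · simp
      · intro b h3 h4
        simp only [if_true, true_and, List.getElem_set, List.getElem_map, List.getElem_range]
        split_ifs <;> first | rfl | omega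
    · simp only [if_neg ha]
      apply List.ext_getElem
      · simp
      · intro b h3 h4
        simp only [List.getElem_map, List.getElem_range]
        have : ¬(a = i.toNat ∧ b = j.toNat) := fun h => ha h.1.symm
        simp [this]

theorem pvFold_inv (m e' : Nat) (hem : e' < m) (v : Nat → String) (k : Nat) (hk : k ≤ m) :
    (List.range k).foldl
      (fun t (i : Nat) => pvFill t ((e' : Int), (i : Int)) (v i)) (pvTab m (fun _ _ => none)) =
      pvTab m (fun a b =>
        if b = e' ∧ a < k then some (v a)
        else if a = e' ∧ b < k then some (v b) else none) := by
  induction k with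
  | zero =>
    simp only [List.range_zero, List.foldl_nil]
    apply pvTab_congr; intro a b _ _; simp
  | succ k ih =>
    rw [List.range_succ, List.foldl_append, ih (by omega)]
    simp only [List.foldl_cons, List.foldl_nil]
    unfold pvFill
    rw [pvSetCell_tab (by positivity) (by simpa using hem) (by positivity) (by simpa using (by omega : k < m))]
    rw [pvSetCell_tab (by positivity) (by simpa using (by omega : k < m)) (by positivity) (by simpa using hem)]
    apply pvTab_congr
    intro a b ha hb
    simp only [Int.toNat_natCast]
    split_ifs <;> first | rfl | omega | (congr 2; omega)

theorem pvBase_eq (n e : Int) (h0 : 0 ≤ e) (hem : e.toNat < n.toNat) :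
    (PySem.List.pyRange 0 n 1).foldl
      (fun t i => pvFill t (e, i)
        (PySem.List.pyGetD ((PySem.List.pyRange 0 n 1).map pvSym) i ""))
      ((PySem.List.pyRange 0 n 1).map
        (fun _ => (PySem.List.pyRange 0 n 1).map (fun _ => (none : Option String)))) =
    (PySem.List.pyRange 0 n 1).map (fun i => (PySem.List.pyRange 0 n 1).map (fun j =>
      if i = e then some (PySem.List.pyGetD ((PySem.List.pyRange 0 n 1).map pvSym) j "")
      else if j = e then some (PySem.List.pyGetD ((PySem.List.pyRange 0 n 1).map pvSym) i "")
      else none)) := by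
  obtain ⟨m, rfl⟩ : ∃ m : Nat, n = (m : Int) := ⟨n.toNat, by omega⟩
  obtain ⟨e', rfl⟩ : ∃ e'' : Nat, e = (e'' : Int) := ⟨e.toNat, by omega⟩
  have hem' : e' < m := by simpa using hem
  rw [PySem.List.pyRange_zero_natCast]
  simp only [List.map_map, List.foldl_map]
  have hsym : ∀ x : Nat, x < m →
      PySem.List.pyGetD (List.map (pvSym ∘ (fun k : Nat => (k : Int))) (List.range m))
        ((x : Nat) : Int) "" = pvSym (x : Int) := by
    intro x hx
    rw [← List.map_map, ← PySem.List.pyRange_zero_natCast]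
    exact PySem.List.pyGetD_map_pyRange pvSym m x "" hx
  rw [PySem.List.foldl_congr_mem _ _
      (fun t (i : Nat) => pvFill t ((e' : Int), (i : Int)) (pvSym i)) _
      (by
        intro acc x hx
        rw [hsym x (List.mem_range.mp hx)])]
  rw [show List.map ((fun (_ : Int) => List.map ((fun (_ : Int) => (none : Option String)) ∘
        (fun k : Nat => (k : Int))) (List.range m)) ∘ (fun k : Nat => (k : Int))) (List.range m)
      = pvTab m (fun _ _ => none) from rfl]
  rw [pvFold_inv m e' hem' (fun i : Nat => pvSym (i : Int)) m le_rfl]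
  unfold pvTab
  refine List.map_congr_left (fun a ha => ?_)
  simp only [Function.comp_apply]
  refine List.map_congr_left (fun b hb => ?_)
  have ham : a < m := List.mem_range.mp ha
  have hbm : b < m := List.mem_range.mp hb
  simp only [Function.comp_apply]
  rw [hsym b hbm, hsym a ham]
  by_cases hae : a = e'
  · have hai : ((a : Nat) : Int) = (e' : Int) := by exact_mod_cast hae
    rw [if_pos hai]
    split_ifs <;> first | rfl | omega | (congr 2; omega)
  · have hne : ¬(((a : Nat) : Int) = (e' : Int)) := by exact_mod_cast hae
    rw [if_neg hne]
    by_cases hbe : b = e'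
    · have hbi : ((b : Nat) : Int) = (e' : Int) := by exact_mod_cast hbe
      rw [if_pos hbi]
      split_ifs <;> first | rfl | omega
    · have hbi : ¬(((b : Nat) : Int) = (e' : Int)) := by exact_mod_cast hbe
      rw [if_neg hbi]
      split_ifs <;> first | rfl | omega

theorem pvEnum_flat (s : List String) (ps : List (Int × Int))
    (l : List (List (List (Option String)))) :
    ps.foldl (fun acc c => acc.flatMap (fun u => s.map (pvFill u c))) l =
      l.flatMap (fun t =>
        ps.foldl (fun acc c => acc.flatMap (fun u => s.map (pvFill u c))) [t]) := by
  induction ps generalizing l with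
  | nil => simp
  | cons p ps ih =>
    simp only [List.foldl_cons]
    rw [ih]
    rw [List.flatMap_assoc]
    simp only [List.flatMap_cons, List.flatMap_nil, List.append_nil, ← ih]

theorem pvEnum (s : List String) (ps : List (Int × Int))
    (t : List (List (Option String))) :
    ps.foldl (fun acc c => acc.flatMap (fun u => s.map (pvFill u c))) [t] =
      (pvProdRepeat s ps.length).map
        (fun combo => (ps.zip combo).foldl (fun u e => pvFill u e.1 e.2) t) := by
  induction ps generalizing t with
  | nil => simp [pvProdRepeat]
  | cons p ps ih =>
    simp only [List.foldl_cons, List.length_cons]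
    rw [show (([t] : List (List (List (Option String)))).flatMap fun u => s.map (pvFill u p)) = s.map (pvFill t p) by simp]
    rw [pvEnum_flat, List.flatMap_map]
    simp only [ih]
    simp only [pvProdRepeat, List.map_flatMap, List.map_map]
    rfl

theorem pvCells_eq (n e : Int) :
    (PySem.List.pyRange 0 n 1).flatMap (fun i =>
      (PySem.List.pyRange i n 1).filterMap (fun j =>
        if PySem.List.pyGetD (PySem.List.pyGetD
            ((PySem.List.pyRange 0 n 1).map (fun i => (PySem.List.pyRange 0 n 1).map (fun j =>
              if i = e then some (PySem.List.pyGetD ((PySem.List.pyRange 0 n 1).map pvSym) j "")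
              else if j = e then some (PySem.List.pyGetD ((PySem.List.pyRange 0 n 1).map pvSym) i "")
              else none))) i []) j (some "") = none
        then some (i, j) else none)) =
    (PySem.List.pyRange 0 n 1).flatMap (fun i =>
      (PySem.List.pyRange i n 1).filterMap (fun j =>
        if i ≠ e ∧ j ≠ e then some (i, j) else none)) := by
  refine List.flatMap_congr (fun i hi => ?_)
  obtain ⟨hi0, hin⟩ := PySem.List.mem_pyRange_one.mp hi
  refine List.filterMap_congr (fun j hj => ?_)
  obtain ⟨hji, hjn⟩ := PySem.List.mem_pyRange_one.mp hj
  rw [PySem.List.pyGetD_map_pyRange_of_nonneg _ _ _ _ hi0 hin]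
  rw [PySem.List.pyGetD_map_pyRange_of_nonneg _ _ _ _ (le_trans hi0 hji) hjn]
  by_cases hie : i = e
  · simp [hie]
  · by_cases hje : j = e
    · simp [hie, hje]
    · simp [hie, hje]

theorem pvMain (n e : Int) (h0 : 0 ≤ e) (hem : e.toNat < n.toNat) :
    (pvProdRepeat ((PySem.List.pyRange 0 n 1).map pvSym)
      ((PySem.List.pyRange 0 n 1).flatMap (fun i =>
        (PySem.List.pyRange i n 1).filterMap (fun j =>
          if PySem.List.pyGetD (PySem.List.pyGetD
              ((PySem.List.pyRange 0 n 1).foldl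
                (fun t i => pvFill t (e, i)
                  (PySem.List.pyGetD ((PySem.List.pyRange 0 n 1).map pvSym) i ""))
                ((PySem.List.pyRange 0 n 1).map
                  (fun _ => (PySem.List.pyRange 0 n 1).map (fun _ => (none : Option String)))))
              i []) j (some "") = none
          then some (i, j) else none))).length).map (fun combo =>
      pvStrip ((((PySem.List.pyRange 0 n 1).flatMap (fun i =>
        (PySem.List.pyRange i n 1).filterMap (fun j =>
          if PySem.List.pyGetD (PySem.List.pyGetD
              ((PySem.List.pyRange 0 n 1).foldl
                (fun t i => pvFill t (e, i)
                  (PySem.List.pyGetD ((PySem.List.pyRange 0 n 1).map pvSym) i ""))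
                ((PySem.List.pyRange 0 n 1).map
                  (fun _ => (PySem.List.pyRange 0 n 1).map (fun _ => (none : Option String)))))
              i []) j (some "") = none
          then some (i, j) else none))).zip combo).foldl
        (fun t e => pvFill t e.1 e.2)
        ((PySem.List.pyRange 0 n 1).foldl
          (fun t i => pvFill t (e, i)
            (PySem.List.pyGetD ((PySem.List.pyRange 0 n 1).map pvSym) i ""))
          ((PySem.List.pyRange 0 n 1).map
            (fun _ => (PySem.List.pyRange 0 n 1).map (fun _ => (none : Option String))))))) =
    (((PySem.List.pyRange 0 n 1).flatMap (fun i =>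
      (PySem.List.pyRange i n 1).filterMap (fun j =>
        if i ≠ e ∧ j ≠ e then some (i, j) else none))).foldl
      (fun acc c => acc.flatMap (fun t => ((PySem.List.pyRange 0 n 1).map pvSym).map (pvFill t c)))
      [(PySem.List.pyRange 0 n 1).map (fun i => (PySem.List.pyRange 0 n 1).map (fun j =>
        if i = e then some (PySem.List.pyGetD ((PySem.List.pyRange 0 n 1).map pvSym) j "")
        else if j = e then some (PySem.List.pyGetD ((PySem.List.pyRange 0 n 1).map pvSym) i "")
        else none))]).map pvStrip := by
  rw [pvBase_eq n e h0 hem, pvCells_eq n e, pvEnum]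
  rw [List.map_map]
  rfl

-- ===== VERDICT (by name: the statement is the Claim_ definition above) =====
theorem generate_tables_spec : Claim_equal_generate_tables := by
  intro n opp _ hpre
  unfold Spec_generate_tables generate_tables generate_tables_alt
  by_cases hn : n ≤ 0
  · rw [PySem.List.pyRange_one_eq_nil hn]
    simp [pvProdRepeat, pvStrip]
  · by_cases hop : (opp == "add") = true
    · rw [if_pos hop]
      exact pvMain n 0 le_rfl (by omega)
    · rw [if_neg hop]
      have hne : opp ≠ "add" := fun h => hop (by simp [h])
      have h2 : n ≠ 1 := fun h => hpre ⟨h, hne⟩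
      exact pvMain n 1 (by omega) (by omega)
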